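-- pv_equiv track=rewrite | github.com/maxwellsayles/puzzles | higherlower.py | higher_lower
-- ===== SOURCE A (Python) =====
-- def higher_lower(xs):
-- 	res = []
-- 	v = 1
-- 	c = 1
-- 	for x in xs:
-- 		if x == '-':
-- 			c += 1
-- 		else:
-- 			for i in reversed(range(v, v + c)):
-- 				res.append(i)
-- 			v += c
-- 			c = 1
-- 	for i in reversed(range(v, v + c)):
-- 		res.append(i)
-- 	return res
-- ===== SOURCE B (Python) =====
-- def higher_lower(xs):
--     # Phase 1: block sizes (a '-' extends the current block, anything else closes it).
--     sizes = []
--     c = 1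
--     for x in xs:
--         if x == '-':
--             c += 1
--         else:
--             sizes.append(c)
--             c = 1
--     sizes.append(c)
--     # Phase 2: identity permutation, then emit one reversed window per block.
--     res = list(range(1, len(xs) + 2))
--     out = []
--     start = 0
--     for s in sizes:
--         out.extend(reversed(res[start:start + s]))
--         start += s
--     return out
-- ===== Notes on version B (the rewrite author's own statement) =====
-- stated objective: alternative
-- what changed: A interleaves scanning with synthesising each descending run from a running base value; B first computes the list of block sizes, then builds the identity permutation 1..n+1 and reverses one window per block (table-then-transform).
import Mathlib
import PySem

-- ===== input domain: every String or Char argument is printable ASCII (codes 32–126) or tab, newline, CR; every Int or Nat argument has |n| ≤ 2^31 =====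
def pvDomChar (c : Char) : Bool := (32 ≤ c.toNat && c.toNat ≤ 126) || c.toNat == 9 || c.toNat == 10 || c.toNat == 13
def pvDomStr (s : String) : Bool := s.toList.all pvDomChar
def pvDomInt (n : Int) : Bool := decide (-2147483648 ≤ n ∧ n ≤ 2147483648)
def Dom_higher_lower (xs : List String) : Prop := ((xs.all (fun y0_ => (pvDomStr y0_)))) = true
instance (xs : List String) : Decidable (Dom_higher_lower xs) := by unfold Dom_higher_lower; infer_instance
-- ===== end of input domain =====

-- B replaces A's interleaved scan-and-emit with a two-phase shape (block sizes, then
-- identity permutation with one reversed window per block); objective: alternative.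

-- ===== PORT A =====
-- state (res, v, c); reversed(range(v, v+c)) appended element-wise = (pyRange v (v+c) 1).reverse
def higher_lower (xs : List String) : List Int :=
  let st := xs.foldl
    (fun (acc : List Int × Int × Int) x =>
      if x = "-" then (acc.1, acc.2.1, acc.2.2 + 1)
      else (acc.1 ++ (PySem.List.pyRange acc.2.1 (acc.2.1 + acc.2.2) 1).reverse,
            acc.2.1 + acc.2.2, 1))
    ([], 1, 1)
  st.1 ++ (PySem.List.pyRange st.2.1 (st.2.1 + st.2.2) 1).reverse

-- ===== PORT B =====
-- phase 1: fold collecting (sizes, c); phase 2: fold over sizes with state (out, rest)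
def higher_lower_alt (xs : List String) : List Int :=
  let p := xs.foldl
    (fun (acc : List Int × Int) x =>
      if x = "-" then (acc.1, acc.2 + 1) else (acc.1 ++ [acc.2], 1))
    ([], 1)
  let sizes := p.1 ++ [p.2]
  let res := PySem.List.pyRange 1 ((xs.length : Int) + 2) 1
  (sizes.foldl
    (fun (acc : List Int × Int) s =>
      (acc.1 ++ (PySem.List.slice res (some acc.2) (some (acc.2 + s))).reverse,
       acc.2 + s))
    (([] : List Int), (0 : Int))).1

-- ===== PRECONDITION & SPEC =====
def Spec_higher_lower (xs : List String) (out : List Int) : Prop := out = higher_lower_alt xs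
instance (xs : List String) (out : List Int) : Decidable (Spec_higher_lower xs out) := by unfold Spec_higher_lower; infer_instance

-- ===== CLAIM (what is proved, stated in full; the proofs are below) =====
def Claim_equal_higher_lower : Prop := ∀ (xs : List String), Dom_higher_lower xs → Spec_higher_lower xs (higher_lower xs)

-- ===== LEMMAS AND PROOFS =====

-- Specification of A's output: one descending run per block.
def blocksSpec : List String → Int → Int → List Int
  | [], v, c => (PySem.List.pyRange v (v + c) 1).reverse
  | x :: t, v, c =>
      if x = "-" then blocksSpec t v (c + 1)
      else (PySem.List.pyRange v (v + c) 1).reverse ++ blocksSpec t (v + c) 1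

-- Specification of B's phase 1.
def sizesSpec : List String → Int → List Int
  | [], c => [c]
  | x :: t, c => if x = "-" then sizesSpec t (c + 1) else c :: sizesSpec t 1

-- Specification of B's phase 2: one reversed window of `res` per size.
def windows2 (res : List Int) : List Int → Int → List Int
  | [], _ => []
  | s :: ss, start =>
      (PySem.List.slice res (some start) (some (start + s))).reverse ++
        windows2 res ss (start + s)

theorem lemA (xs : List String) (acc : List Int × Int × Int) :
    (xs.foldl
      (fun (acc : List Int × Int × Int) x =>
        if x = "-" then (acc.1, acc.2.1, acc.2.2 + 1)
        else (acc.1 ++ (PySem.List.pyRange acc.2.1 (acc.2.1 + acc.2.2) 1).reverse,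
              acc.2.1 + acc.2.2, 1)) acc).1 ++
      (PySem.List.pyRange
        (xs.foldl
          (fun (acc : List Int × Int × Int) x =>
            if x = "-" then (acc.1, acc.2.1, acc.2.2 + 1)
            else (acc.1 ++ (PySem.List.pyRange acc.2.1 (acc.2.1 + acc.2.2) 1).reverse,
                  acc.2.1 + acc.2.2, 1)) acc).2.1
        ((xs.foldl
          (fun (acc : List Int × Int × Int) x =>
            if x = "-" then (acc.1, acc.2.1, acc.2.2 + 1)
            else (acc.1 ++ (PySem.List.pyRange acc.2.1 (acc.2.1 + acc.2.2) 1).reverse,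
                  acc.2.1 + acc.2.2, 1)) acc).2.1 +
         (xs.foldl
          (fun (acc : List Int × Int × Int) x =>
            if x = "-" then (acc.1, acc.2.1, acc.2.2 + 1)
            else (acc.1 ++ (PySem.List.pyRange acc.2.1 (acc.2.1 + acc.2.2) 1).reverse,
                  acc.2.1 + acc.2.2, 1)) acc).2.2) 1).reverse
    = acc.1 ++ blocksSpec xs acc.2.1 acc.2.2 := by
  induction xs generalizing acc with
  | nil => simp [blocksSpec]
  | cons x t ih =>
      by_cases hx : x = "-"
      · simp only [List.foldl_cons, hx, blocksSpec]
        exact ih _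
      · simp only [List.foldl_cons, blocksSpec, if_neg hx]
        rw [ih _]
        simp

theorem lemB1 (xs : List String) (acc : List Int × Int) :
    (xs.foldl
      (fun (acc : List Int × Int) x =>
        if x = "-" then (acc.1, acc.2 + 1) else (acc.1 ++ [acc.2], 1)) acc).1 ++
      [(xs.foldl
        (fun (acc : List Int × Int) x =>
          if x = "-" then (acc.1, acc.2 + 1) else (acc.1 ++ [acc.2], 1)) acc).2]
    = acc.1 ++ sizesSpec xs acc.2 := by
  induction xs generalizing acc with
  | nil => simp [sizesSpec]
  | cons x t ih =>
      by_cases hx : x = "-"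
      · simp only [List.foldl_cons, hx, sizesSpec]
        exact ih _
      · simp only [List.foldl_cons, sizesSpec, if_neg hx]
        rw [ih _]
        simp

theorem lemB2 (res : List Int) (sizes : List Int) (out : List Int) (start : Int) :
    (sizes.foldl
      (fun (acc : List Int × Int) s =>
        (acc.1 ++ (PySem.List.slice res (some acc.2) (some (acc.2 + s))).reverse,
         acc.2 + s)) (out, start)).1
    = out ++ windows2 res sizes start := by
  induction sizes generalizing out start with
  | nil => simp [windows2]
  | cons s ss ih =>
      simp only [List.foldl_cons, windows2]
      rw [ih]
      simp

theorem takeRange (a b k : Int) (h0 : 0 ≤ k) (h : a + k ≤ b) :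
    (PySem.List.pyRange a b 1).take k.toNat = PySem.List.pyRange a (a + k) 1 := by
  have hlen : (PySem.List.pyRange a (a + k) 1).length = k.toNat := by
    rw [PySem.List.length_pyRange_one]; omega
  rw [PySem.List.pyRange_one_append a (a + k) b (by omega) h, ← hlen, List.take_left]

theorem dropRange (a b k : Int) (h0 : 0 ≤ k) (h : a + k ≤ b) :
    (PySem.List.pyRange a b 1).drop k.toNat = PySem.List.pyRange (a + k) b 1 := by
  have hlen : (PySem.List.pyRange a (a + k) 1).length = k.toNat := by
    rw [PySem.List.length_pyRange_one]; omega
  rw [PySem.List.pyRange_one_append a (a + k) b (by omega) h, ← hlen, List.drop_left]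

theorem sliceRange (M start c : Int) (h0 : 0 ≤ start) (hc : 0 ≤ c)
    (hb : 1 + start + c ≤ M) :
    PySem.List.slice (PySem.List.pyRange 1 M 1) (some start) (some (start + c))
    = PySem.List.pyRange (1 + start) (1 + start + c) 1 := by
  rw [PySem.List.slice_toNat _ h0 (by omega)]
  rw [dropRange 1 M start h0 (by omega)]
  have hsub : (start + c).toNat - start.toNat = c.toNat := by omega
  rw [hsub, takeRange (1 + start) M c hc (by omega)]

theorem lemKey (xs : List String) (c start M : Int) (hc : 1 ≤ c) (h0 : 0 ≤ start)
    (hb : start + c + xs.length + 1 ≤ M) :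
    windows2 (PySem.List.pyRange 1 M 1) (sizesSpec xs c) start
    = blocksSpec xs (1 + start) c := by
  induction xs generalizing c start with
  | nil =>
      simp only [sizesSpec, windows2, blocksSpec]
      rw [sliceRange M start c h0 (by omega) (by simp at hb; omega)]
      simp
  | cons x t ih =>
      by_cases hx : x = "-"
      · subst hx
        simp only [sizesSpec, blocksSpec, if_true, List.length_cons,
          Nat.cast_add, Nat.cast_one] at hb ⊢
        exact ih (c + 1) start (by omega) h0 (by omega)
      · simp only [sizesSpec, blocksSpec, if_neg hx, windows2, List.length_cons,
          Nat.cast_add, Nat.cast_one] at hb ⊢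
        have hlt : (0:Int) ≤ (t.length : Int) := by positivity
        rw [sliceRange M start c h0 (by omega) (by omega)]
        have hih := ih 1 (start + c) (by omega) (by omega) (by omega)
        rw [show (1:Int) + (start + c) = 1 + start + c by ring] at hih
        rw [hih]

-- ===== VERDICT (by name: the statement is the Claim_ definition above) =====
theorem higher_lower_spec : Claim_equal_higher_lower := by
  intro xs _
  show higher_lower xs = higher_lower_alt xs
  simp only [higher_lower, higher_lower_alt]
  rw [lemA xs ([], 1, 1), lemB1 xs ([], 1)]
  simp only [List.nil_append]
  rw [lemB2 _ _ _ _]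
  have hkey := lemKey xs 1 0 ((xs.length : Int) + 2) (by omega) (by omega) (by omega)
  rw [show (1:Int) + 0 = 1 by ring] at hkey
  rw [hkey]
  simp
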